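-- pv_equiv track=rewrite | github.com/ntopower2/leetcode | editor/en/1381DesignAStackWithIncrementOperation.py | driver
-- ===== SOURCE A (Python) =====
-- class CustomStack:
--     def __init__(self, maxSize: int):
--         self.values = [-1] * maxSize
--         self.increments = [0] * maxSize
--         self.size = 0
--
--     def push(self, x: int) -> None:
--         if self.size < len(self.values):
--             self.values[self.size] = x
--             self.size += 1
--
--     def pop(self) -> int:
--         if not self.size:
--             return -1
--
--         self.size -= 1
--         tmp = self.values[self.size] + self.increments[self.size]
--         if self.size:
--             self.increments[self.size - 1] += self.increments[self.size]
--         self.increments[self.size] = 0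
--         return tmp
--
--     def increment(self, k: int, val: int) -> None:
--         if not self.size:
--             return
--         self.increments[min(k, self.size) - 1] += val
--
-- def driver(operations, values):
--     struct = None
--     results = []
--
--     for i, operation in enumerate(operations):
--         if operation == "CustomStack":
--             struct = CustomStack(values[i][0])
--             results.append(None)
--         elif operation == "push":
--             struct.push(values[i][0])
--             results.append(None)
--         elif operation == "pop":
--             results.append(struct.pop())
--         elif operation == "increment":
--             struct.increment(values[i][0], values[i][1])
--             results.append(None)
--
--     return results
-- ===== SOURCE B (Python) =====
-- def driver(operations, values):
--     results = []
--     stack = []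
--     max_size = 0
--
--     for i, operation in enumerate(operations):
--         if operation == "CustomStack":
--             max_size = values[i][0]
--             stack = []
--             results.append(None)
--         elif operation == "push":
--             if len(stack) < max_size:
--                 stack.append(values[i][0])
--             results.append(None)
--         elif operation == "pop":
--             results.append(stack.pop() if stack else -1)
--         elif operation == "increment":
--             k, val = values[i][0], values[i][1]
--             for j in range(min(k, len(stack))):
--                 stack[j] += val
--             results.append(None)
--
--     return results
-- ===== Notes on version B (the rewrite author's own statement) =====
-- stated objective: simpler
-- what changed: B drops A's lazy-propagation state (preallocated values/increments arrays plus a size counter, with increment bookkeeping applied at pop time) and keeps a single eager list of live stack elements: push appends, pop removes the last element, increment adds val directly to the bottom min(k, len(stack)) elements. Pre_ excludes inputs where A raises and increments with k <= 0 (negative-index wraparound artefact, see cites).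
import Mathlib
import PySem

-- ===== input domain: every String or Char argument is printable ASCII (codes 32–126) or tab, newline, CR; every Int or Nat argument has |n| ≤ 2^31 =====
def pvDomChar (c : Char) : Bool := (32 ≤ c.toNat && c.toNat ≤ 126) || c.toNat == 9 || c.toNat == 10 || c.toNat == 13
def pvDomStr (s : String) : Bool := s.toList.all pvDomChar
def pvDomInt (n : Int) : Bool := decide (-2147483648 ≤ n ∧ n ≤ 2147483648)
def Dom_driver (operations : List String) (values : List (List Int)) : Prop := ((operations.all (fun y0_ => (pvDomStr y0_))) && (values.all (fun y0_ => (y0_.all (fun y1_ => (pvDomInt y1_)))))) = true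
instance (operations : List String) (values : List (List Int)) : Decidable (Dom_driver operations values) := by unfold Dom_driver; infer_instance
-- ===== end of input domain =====

-- B replaces A's lazy-increment bookkeeping (values/increments arrays + size) by a single eager
-- list of the live stack elements; objective: simpler state, same results.

-- ===== PORT A =====
-- CustomStack state: values array, increments array, size (Python ints are Int; size stays a
-- nonnegative count, guarded exactly as the Python guards it).
structure CS where
  vals : List Int
  incs : List Int
  size : Nat
deriving Repr, DecidableEq

def csPush (s : CS) (x : Int) : CS :=
  if s.size < s.vals.length then { s with vals := s.vals.set s.size x, size := s.size + 1 } else s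

def csPop (s : CS) : CS × Int :=
  if s.size = 0 then (s, -1)
  else
    ({ s with
        incs := (if s.size - 1 ≠ 0 then
                   s.incs.set (s.size - 1 - 1)
                     (s.incs.getD (s.size - 1 - 1) 0 + s.incs.getD (s.size - 1) 0)
                 else s.incs).set (s.size - 1) 0,
        size := s.size - 1 },
     s.vals.getD (s.size - 1) 0 + s.incs.getD (s.size - 1) 0)

-- `increments[min(k, size) - 1] += val`: Python index may be negative (wraps from the end);
-- an out-of-range index raises IndexError in Python (excluded by Pre_; no-op here).
def csIncIdx (s : CS) (k : Int) : Int :=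
  if min k (s.size : Int) - 1 < 0 then (s.incs.length : Int) + (min k (s.size : Int) - 1)
  else min k (s.size : Int) - 1

def csInc (s : CS) (k val : Int) : CS :=
  if s.size = 0 then s
  else
    if 0 ≤ csIncIdx s k ∧ csIncIdx s k < (s.incs.length : Int) then
      { s with incs := s.incs.set (csIncIdx s k).toNat (s.incs.getD (csIncIdx s k).toNat 0 + val) }
    else s

-- the driver loop; `struct = None` is `none`; where the Python would raise (operation on an
-- uninitialised struct, missing values entry) the port skips — those inputs are outside Pre_.
def driverGo : List String → List (List Int) → Option CS → List (Option Int) → List (Option Int)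
  | [], _, _, acc => acc.reverse
  | op :: ops, vals, st, acc =>
    if op = "CustomStack" then
      let m := ((vals.headD []).getD 0 0).toNat
      driverGo ops vals.tail (some ⟨List.replicate m (-1), List.replicate m 0, 0⟩) (none :: acc)
    else if op = "push" then
      match st with
      | none => driverGo ops vals.tail st acc
      | some s => driverGo ops vals.tail (some (csPush s ((vals.headD []).getD 0 0))) (none :: acc)
    else if op = "pop" then
      match st with
      | none => driverGo ops vals.tail st acc
      | some s => driverGo ops vals.tail (some (csPop s).1) (some (csPop s).2 :: acc)
    else if op = "increment" then
      match st with
      | none => driverGo ops vals.tail st acc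
      | some s =>
        driverGo ops vals.tail
          (some (csInc s ((vals.headD []).getD 0 0) ((vals.headD []).getD 1 0))) (none :: acc)
    else driverGo ops vals.tail st acc

def driver (operations : List String) (values : List (List Int)) : List (Option Int) :=
  driverGo operations values none []

-- ===== PORT B =====
-- `for j in range(min(k, len(stack))): stack[j] += val`
def incLoop (stack : List Int) (k val : Int) : List Int :=
  (PySem.List.pyRange 0 (min k (stack.length : Int)) 1).foldl
    (fun st j => st.set j.toNat (st.getD j.toNat 0 + val)) stack

def driverAltGo : List String → List (List Int) → List Int → Int → List (Option Int) → List (Option Int)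
  | [], _, _, _, acc => acc.reverse
  | op :: ops, vals, stack, mx, acc =>
    if op = "CustomStack" then
      driverAltGo ops vals.tail [] ((vals.headD []).getD 0 0) (none :: acc)
    else if op = "push" then
      driverAltGo ops vals.tail
        (if (stack.length : Int) < mx then stack ++ [(vals.headD []).getD 0 0] else stack)
        mx (none :: acc)
    else if op = "pop" then
      if stack.isEmpty then driverAltGo ops vals.tail stack mx (some (-1) :: acc)
      else driverAltGo ops vals.tail stack.dropLast mx (some (stack.getLastD 0) :: acc)
    else if op = "increment" then
      driverAltGo ops vals.tail
        (incLoop stack ((vals.headD []).getD 0 0) ((vals.headD []).getD 1 0)) mx (none :: acc)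
    else driverAltGo ops vals.tail stack mx acc

def driver_alt (operations : List String) (values : List (List Int)) : List (Option Int) :=
  driverAltGo operations values [] 0 []

-- ===== PRECONDITION & SPEC =====
-- Scan of the call sequence (no simulation of the stack): every recognised operation comes after
-- a "CustomStack", each operation that reads values[i] finds enough entries there, and every
-- increment has k ≥ 1.  Pre_ excludes (a) inputs where the Python A raises (operation before
-- "CustomStack", missing/short values entry, increment index past the array) and (b) increments
-- with k ≤ 0, on which A, when it does return, has applied the increment through Python's
-- negative-index wraparound to the TOP storage slot — an artefact no caller would specify.
def preOK : Bool → List String → List (List Int) → Bool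
  | _, [], _ => true
  | b, op :: ops, vals =>
    let hd := vals.headD []
    if op = "CustomStack" then (!vals.isEmpty && !hd.isEmpty) && preOK true ops vals.tail
    else if op = "push" then b && (!vals.isEmpty && !hd.isEmpty) && preOK b ops vals.tail
    else if op = "pop" then b && preOK b ops vals.tail
    else if op = "increment" then
      b && (!vals.isEmpty && decide (2 ≤ hd.length) && decide ((1:Int) ≤ hd.getD 0 0))
        && preOK b ops vals.tail
    else preOK b ops vals.tail

def Pre_driver (operations : List String) (values : List (List Int)) : Prop :=
  preOK false operations values = true
instance (operations : List String) (values : List (List Int)) : Decidable (Pre_driver operations values) := by unfold Pre_driver; infer_instance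

def pvWitness_driver : List String × List (List Int) :=
  (["CustomStack", "push", "push", "increment", "pop", "pop"], [[3], [5], [7], [1, 10], [], []])

def Spec_driver (operations : List String) (values : List (List Int)) (out : List (Option Int)) : Prop := out = driver_alt operations values
instance (operations : List String) (values : List (List Int)) (out : List (Option Int)) : Decidable (Spec_driver operations values out) := by unfold Spec_driver; infer_instance

-- ===== CLAIM (what is proved, stated in full; the proofs are below) =====
def Claim_equal_driver : Prop := ∀ (operations : List String) (values : List (List Int)), Dom_driver operations values → Pre_driver operations values → Spec_driver operations values (driver operations values)

-- ===== LEMMAS AND PROOFS =====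

-- suffix sum of the lazy increments over [j, size)
def ssum (incs : List Int) (j size : Nat) : Int := ∑ t ∈ Finset.Ico j size, incs.getD t 0

-- the live stack A's state represents
def absStack (s : CS) : List Int :=
  (List.range s.size).map (fun j => s.vals.getD j 0 + ssum s.incs j s.size)

-- invariant on A's state (mx is B's remembered maxSize)
def InvCS (s : CS) (mx : Int) : Prop :=
  s.incs.length = s.vals.length ∧ s.vals.length = mx.toNat ∧ s.size ≤ s.vals.length ∧
    (∀ t, s.size ≤ t → s.incs.getD t 0 = 0)

theorem getD_set' (l : List Int) (i j : Nat) (a d : Int) :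
    (l.set i a).getD j d = if i = j ∧ i < l.length then a else l.getD j d := by
  simp only [List.getD_eq_getElem?_getD, List.getElem?_set]
  by_cases h1 : i = j
  · subst h1
    by_cases h2 : i < l.length
    · simp [h2]
    · simp [h2]
  · simp [h1]

theorem length_absStack (s : CS) : (absStack s).length = s.size := by
  simp [absStack]

theorem ssum_congr {incs incs' : List Int} {j size : Nat}
    (h : ∀ t, j ≤ t → t < size → incs'.getD t 0 = incs.getD t 0) :
    ssum incs' j size = ssum incs j size := by
  unfold ssum
  exact Finset.sum_congr rfl (fun t ht => by
    rcases Finset.mem_Ico.mp ht with ⟨h1, h2⟩; exact h t h1 h2)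

theorem ssum_succ_top (incs : List Int) {j size : Nat} (h : j ≤ size) :
    ssum incs j (size + 1) = ssum incs j size + incs.getD size 0 :=
  Finset.sum_Ico_succ_top h _

theorem ssum_set_add (incs : List Int) (p : Nat) (v : Int) {j size : Nat}
    (hp : p < incs.length) (hj : j ≤ p) (hps : p < size) :
    ssum (incs.set p (incs.getD p 0 + v)) j size = ssum incs j size + v := by
  unfold ssum
  have : ∀ t ∈ Finset.Ico j size,
      (incs.set p (incs.getD p 0 + v)).getD t 0
        = incs.getD t 0 + (if t = p then v else 0) := by
    intro t _
    rw [getD_set']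
    by_cases h : t = p
    · subst h; rw [if_pos ⟨rfl, hp⟩, if_pos rfl]
    · rw [if_neg (by tauto), if_neg h, add_zero]
  rw [Finset.sum_congr rfl this, Finset.sum_add_distrib, Finset.sum_ite_eq' (Finset.Ico j size)]
  simp [Finset.mem_Ico.mpr ⟨hj, hps⟩]

-- the characterisation of B's increment loop
theorem foldl_set_upto (val : Int) : ∀ (M : Nat) (stack : List Int), M ≤ stack.length →
    (PySem.List.pyRange 0 (M : Int) 1).foldl
        (fun st j => st.set j.toNat (st.getD j.toNat 0 + val)) stack
      = (stack.take M).map (· + val) ++ stack.drop M := by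
  intro M
  induction M with
  | zero => intro stack _; simp [PySem.List.pyRange_one_eq_nil]
  | succ M ih =>
    intro stack hM
    have hM' : M < stack.length := by omega
    have hsplit : (((M : Nat) + 1 : Nat) : Int) = ((M : Nat) : Int) + 1 := by push_cast; ring
    rw [hsplit, PySem.List.pyRange_one_succ_right (by exact_mod_cast Nat.zero_le M),
      List.foldl_append, ih stack (le_of_lt hM')]
    simp only [List.foldl_cons, List.foldl_nil, Int.toNat_natCast]
    have hlen : ((stack.take M).map (· + val)).length = M := by
      simp [List.length_take]; omega
    have hg := List.getD_append_right ((stack.take M).map (· + val)) (stack.drop M) 0 M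
      (le_of_eq hlen)
    rw [List.set_append, if_neg (by rw [hlen]; omega), hg, hlen, Nat.sub_self,
      List.drop_eq_getElem_cons hM']
    simp only [List.set_cons_zero, List.getD_cons_zero]
    have htake : List.take (M + 1) (stack.map (· + val))
        = List.take M (stack.map (· + val)) ++ [stack[M] + val] := by
      rw [List.take_succ]
      simp [List.getElem?_map, List.getElem?_eq_getElem hM']
    simp only [List.map_take]
    rw [htake]
    simp
  
theorem ssum_self (incs : List Int) (j : Nat) : ssum incs j j = 0 := by simp [ssum]

-- push: A's lazy state pushes x exactly when B's stack does, and the abstraction appends x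
theorem abs_push {s : CS} {mx : Int} (hInv : InvCS s mx) (x : Int) (h : s.size < s.vals.length) :
    absStack (csPush s x) = absStack s ++ [x] ∧ InvCS (csPush s x) mx := by
  obtain ⟨hlen, hmx, _, hz⟩ := hInv
  have hcs : csPush s x = { s with vals := s.vals.set s.size x, size := s.size + 1 } := by
    unfold csPush; rw [if_pos h]
  rw [hcs]
  constructor
  · unfold absStack
    simp only [List.range_succ, List.map_append, List.map_cons, List.map_nil]
    congr 1
    · apply List.map_congr_left
      intro j hj
      have hj' : j < s.size := List.mem_range.mp hj
      rw [getD_set', if_neg (by omega),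
        ssum_succ_top _ (le_of_lt hj'), hz s.size le_rfl, add_zero]
    · rw [getD_set', if_pos ⟨rfl, h⟩,
        ssum_succ_top _ le_rfl, ssum_self, zero_add, hz s.size le_rfl, add_zero]
  · refine ⟨?_, ?_, ?_, ?_⟩
    · show s.incs.length = (s.vals.set s.size x).length
      rw [List.length_set]; exact hlen
    · show (s.vals.set s.size x).length = mx.toNat
      rw [List.length_set]; exact hmx
    · show s.size + 1 ≤ (s.vals.set s.size x).length
      rw [List.length_set]; omega
    · intro t ht
      replace ht : s.size + 1 ≤ t := ht
      show s.incs.getD t 0 = 0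
      exact hz t (by omega)

-- pop: the popped value is the top of the abstract stack, the rest is its dropLast
theorem abs_pop {s : CS} {mx : Int} (hInv : InvCS s mx) (h : s.size ≠ 0) :
    (csPop s).2 = (absStack s).getLastD 0 ∧
    absStack (csPop s).1 = (absStack s).dropLast ∧ InvCS (csPop s).1 mx := by
  obtain ⟨hlen, hmx, hsz, hz⟩ := hInv
  obtain ⟨n, hn⟩ : ∃ n, s.size = n + 1 := ⟨s.size - 1, by omega⟩
  have hnlen : n < s.incs.length := by omega
  have hcs1 : (csPop s).1 = { s with
      incs := (if n ≠ 0 then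
                 s.incs.set (n - 1) (s.incs.getD (n - 1) 0 + s.incs.getD n 0)
               else s.incs).set n 0,
      size := n } := by
    unfold csPop; rw [if_neg h, hn]; simp
  have hcs2 : (csPop s).2 = s.vals.getD n 0 + s.incs.getD n 0 := by
    unfold csPop; rw [if_neg h, hn]; simp
  have hL : ((if n ≠ 0 then
        s.incs.set (n - 1) (s.incs.getD (n - 1) 0 + s.incs.getD n 0)
      else s.incs).set n 0).length = s.incs.length := by
    rw [List.length_set]; split <;> simp
  refine ⟨?_, ?_, ?_⟩
  · rw [hcs2]
    unfold absStack
    rw [hn]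
    simp only [List.range_succ, List.map_append, List.map_cons, List.map_nil,
      List.getLastD_concat]
    rw [ssum_succ_top _ le_rfl, ssum_self, zero_add]
  · rw [hcs1]
    unfold absStack
    simp only
    rw [hn]
    simp only [List.range_succ, List.map_append, List.map_cons, List.map_nil,
      List.dropLast_concat]
    apply List.map_congr_left
    intro j hj
    have hj' : j < n := List.mem_range.mp hj
    have hn0 : n ≠ 0 := by omega
    rw [if_pos hn0]
    congr 1
    have step2 : ssum ((s.incs.set (n - 1) (s.incs.getD (n - 1) 0 + s.incs.getD n 0)).set n 0) j n
        = ssum (s.incs.set (n - 1) (s.incs.getD (n - 1) 0 + s.incs.getD n 0)) j n := by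
      apply ssum_congr
      intro t _ ht2
      rw [getD_set', if_neg (by omega)]
    rw [step2, ssum_set_add _ _ _ (by omega) (by omega) (by omega),
      ssum_succ_top _ (le_of_lt hj')]
  · rw [hcs1]
    refine ⟨?_, hmx, ?_, ?_⟩
    · show ((if n ≠ 0 then
            s.incs.set (n - 1) (s.incs.getD (n - 1) 0 + s.incs.getD n 0)
          else s.incs).set n 0).length = s.vals.length
      rw [hL]; exact hlen
    · show n ≤ s.vals.length
      omega
    · intro t ht
      replace ht : n ≤ t := ht
      show ((if n ≠ 0 then
            s.incs.set (n - 1) (s.incs.getD (n - 1) 0 + s.incs.getD n 0)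
          else s.incs).set n 0).getD t 0 = 0
      rw [getD_set']
      by_cases hne : n = t
      · subst hne
        rw [if_pos ⟨rfl, by
          have hL2 : (if n ≠ 0 then
              s.incs.set (n - 1) (s.incs.getD (n - 1) 0 + s.incs.getD n 0)
            else s.incs).length = s.incs.length := by split <;> simp
          rw [hL2]; exact hnlen⟩]
      · rw [if_neg (by tauto)]
        split
        · rw [getD_set', if_neg (by omega)]
          exact hz t (by omega)
        · exact hz t (by omega)

-- increment: the lazy bump at min(k,size)-1 is the eager bump of the bottom min(k,size) elements
theorem abs_inc {s : CS} {mx : Int} (hInv : InvCS s mx) {k : Int} (val : Int) (hk : 1 ≤ k) :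
    incLoop (absStack s) k val = absStack (csInc s k val) ∧ InvCS (csInc s k val) mx := by
  obtain ⟨hlen, hmx, hsz, hz⟩ := hInv
  by_cases h0 : s.size = 0
  · have hcs : csInc s k val = s := by unfold csInc; rw [if_pos h0]
    rw [hcs]
    unfold incLoop
    rw [length_absStack, h0]
    have hmin : min k ((0 : Nat) : Int) = 0 := by omega
    rw [hmin]
    exact ⟨by simp [PySem.List.pyRange_one_eq_nil], hlen, hmx, hsz, hz⟩
  · set M : Nat := (min k (s.size : Int)).toNat with hM
    have hM1 : 1 ≤ M := by omega
    have hMs : M ≤ s.size := by omega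
    have hcast : min k ((s.size : Nat) : Int) = (M : Int) := by omega
    have hmint : min k ((s.size : Nat) : Int) - 1 = ((M - 1 : Nat) : Int) := by omega
    have hidxlt : M - 1 < s.incs.length := by omega
    have hidxv : csIncIdx s k = ((M - 1 : Nat) : Int) := by
      unfold csIncIdx
      rw [hmint, if_neg (show ¬(((M - 1 : Nat) : Int) < 0) by omega)]
    have hstep : csInc s k val
        = { s with incs := s.incs.set (M - 1) (s.incs.getD (M - 1) 0 + val) } := by
      unfold csInc
      rw [if_neg h0, hidxv]
      rw [if_pos (⟨by omega, by omega⟩ :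
        (0 : Int) ≤ ((M - 1 : Nat) : Int) ∧ ((M - 1 : Nat) : Int) < (s.incs.length : Int))]
      simp
    rw [hstep]
    constructor
    · unfold incLoop
      rw [length_absStack, hcast,
        foldl_set_upto val M (absStack s) (by rw [length_absStack]; exact hMs)]
      unfold absStack
      simp only
      apply List.ext_getElem
      · simp only [List.length_append, List.length_map, List.length_take, List.length_drop,
          List.length_range]
        omega
      · intro j hj1 hj2
        simp only [List.length_map, List.length_range] at hj2
        by_cases hjM : j < M
        · rw [List.getElem_append_left
            (by simp only [List.length_map, List.length_take, List.length_range]; omega)]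
          simp only [List.getElem_map, List.getElem_take, List.getElem_range]
          rw [ssum_set_add _ _ _ hidxlt (by omega) (by omega)]
          ring
        · rw [List.getElem_append_right
            (by simp only [List.length_map, List.length_take, List.length_range]; omega)]
          simp only [List.length_map, List.length_take, List.length_range, List.getElem_drop,
            List.getElem_map, List.getElem_range]
          have hidx : M + (j - min M s.size) = j := by omega
          rw [hidx]
          congr 1
          apply ssum_congr
          intro t ht1 ht2
          rw [getD_set', if_neg (by omega)]
    · refine ⟨?_, hmx, hsz, ?_⟩
      · show (s.incs.set (M - 1) (s.incs.getD (M - 1) 0 + val)).length = s.vals.length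
        rw [List.length_set]; exact hlen
      · intro t ht
        replace ht : s.size ≤ t := ht
        show (s.incs.set (M - 1) (s.incs.getD (M - 1) 0 + val)).getD t 0 = 0
        rw [getD_set', if_neg (by omega)]
        exact hz t ht

-- replicate arrays: getD is always 0
theorem getD_replicate_zero (n t : Nat) : (List.replicate n (0:Int)).getD t 0 = 0 := by
  simp only [List.getD_eq_getElem?_getD, List.getElem?_replicate]
  split <;> simp

-- one-step unfolding lemmas for the two drivers
theorem dg_cs (ops : List String) (vals : List (List Int)) (st : Option CS)
    (acc : List (Option Int)) :
    driverGo ("CustomStack" :: ops) vals st acc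
      = driverGo ops vals.tail
          (some ⟨List.replicate ((vals.headD []).getD 0 0).toNat (-1),
                 List.replicate ((vals.headD []).getD 0 0).toNat 0, 0⟩) (none :: acc) := rfl

theorem dg_push (ops : List String) (vals : List (List Int)) (s : CS)
    (acc : List (Option Int)) :
    driverGo ("push" :: ops) vals (some s) acc
      = driverGo ops vals.tail (some (csPush s ((vals.headD []).getD 0 0))) (none :: acc) := rfl

theorem dg_pop (ops : List String) (vals : List (List Int)) (s : CS)
    (acc : List (Option Int)) :
    driverGo ("pop" :: ops) vals (some s) acc
      = driverGo ops vals.tail (some (csPop s).1) (some (csPop s).2 :: acc) := rfl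

theorem dg_inc (ops : List String) (vals : List (List Int)) (s : CS)
    (acc : List (Option Int)) :
    driverGo ("increment" :: ops) vals (some s) acc
      = driverGo ops vals.tail
          (some (csInc s ((vals.headD []).getD 0 0) ((vals.headD []).getD 1 0)))
          (none :: acc) := rfl

theorem dg_other (op : String) (ops : List String) (vals : List (List Int)) (st : Option CS)
    (acc : List (Option Int)) (h1 : ¬op = "CustomStack") (h2 : ¬op = "push")
    (h3 : ¬op = "pop") (h4 : ¬op = "increment") :
    driverGo (op :: ops) vals st acc = driverGo ops vals.tail st acc := by
  show (if op = "CustomStack" then _ else if op = "push" then _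
        else if op = "pop" then _ else if op = "increment" then _ else _) = _
  rw [if_neg h1, if_neg h2, if_neg h3, if_neg h4]

theorem da_cs (ops : List String) (vals : List (List Int)) (stack : List Int) (mx : Int)
    (acc : List (Option Int)) :
    driverAltGo ("CustomStack" :: ops) vals stack mx acc
      = driverAltGo ops vals.tail [] ((vals.headD []).getD 0 0) (none :: acc) := rfl

theorem da_push (ops : List String) (vals : List (List Int)) (stack : List Int) (mx : Int)
    (acc : List (Option Int)) :
    driverAltGo ("push" :: ops) vals stack mx acc
      = driverAltGo ops vals.tail
          (if (stack.length : Int) < mx then stack ++ [(vals.headD []).getD 0 0] else stack)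
          mx (none :: acc) := rfl

theorem da_pop (ops : List String) (vals : List (List Int)) (stack : List Int) (mx : Int)
    (acc : List (Option Int)) :
    driverAltGo ("pop" :: ops) vals stack mx acc
      = if stack.isEmpty then driverAltGo ops vals.tail stack mx (some (-1) :: acc)
        else driverAltGo ops vals.tail stack.dropLast mx (some (stack.getLastD 0) :: acc) := rfl

theorem da_inc (ops : List String) (vals : List (List Int)) (stack : List Int) (mx : Int)
    (acc : List (Option Int)) :
    driverAltGo ("increment" :: ops) vals stack mx acc
      = driverAltGo ops vals.tail
          (incLoop stack ((vals.headD []).getD 0 0) ((vals.headD []).getD 1 0)) mx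
          (none :: acc) := rfl

theorem da_other (op : String) (ops : List String) (vals : List (List Int)) (stack : List Int)
    (mx : Int) (acc : List (Option Int)) (h1 : ¬op = "CustomStack") (h2 : ¬op = "push")
    (h3 : ¬op = "pop") (h4 : ¬op = "increment") :
    driverAltGo (op :: ops) vals stack mx acc = driverAltGo ops vals.tail stack mx acc := by
  show (if op = "CustomStack" then _ else if op = "push" then _
        else if op = "pop" then _ else if op = "increment" then _ else _) = _
  rw [if_neg h1, if_neg h2, if_neg h3, if_neg h4]

theorem go_eq : ∀ (ops : List String) (vals : List (List Int)) (st : Option CS)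
    (stack : List Int) (mx : Int) (acc : List (Option Int)),
    preOK st.isSome ops vals = true →
    (∀ s, st = some s → InvCS s mx ∧ stack = absStack s) →
    driverGo ops vals st acc = driverAltGo ops vals stack mx acc := by
  intro ops
  induction ops with
  | nil => intro vals st stack mx acc _ _; simp [driverGo, driverAltGo]
  | cons op ops ih =>
    intro vals st stack mx acc hpre hinv
    by_cases hc : op = "CustomStack"
    · subst hc
      replace hpre : ((!vals.isEmpty && !(vals.headD []).isEmpty)
          && preOK true ops vals.tail) = true := hpre
      rw [Bool.and_eq_true] at hpre
      rw [dg_cs, da_cs]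
      apply ih
      · exact hpre.2
      intro s hs
      injection hs with hs
      subst hs
      refine ⟨⟨by simp, by simp, by simp, fun t _ => getD_replicate_zero _ t⟩, by simp [absStack]⟩
    · by_cases hp : op = "push"
      · subst hp
        cases st with
        | none =>
          replace hpre : ((false && (!vals.isEmpty && !(vals.headD []).isEmpty))
              && preOK false ops vals.tail) = true := hpre
          simp at hpre
        | some s =>
          replace hpre : ((true && (!vals.isEmpty && !(vals.headD []).isEmpty))
              && preOK true ops vals.tail) = true := hpre
          rw [Bool.and_eq_true] at hpre
          have hrest := hpre.2
          obtain ⟨hInv, habs⟩ := hinv s rfl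
          rw [dg_push, da_push]
          have hslen : stack.length = s.size := by rw [habs, length_absStack]
          have hcond : ((stack.length : Int) < mx) ↔ (s.size < s.vals.length) := by
            rw [hslen]
            obtain ⟨-, hmx, -, -⟩ := hInv
            omega
          by_cases hlt : s.size < s.vals.length
          · obtain ⟨habs', hInv'⟩ := abs_push hInv ((vals.headD []).getD 0 0) hlt
            rw [if_pos (hcond.mpr hlt)]
            apply ih
            · exact hrest
            intro s' hs'
            injection hs' with hs'
            subst hs'
            exact ⟨hInv', by rw [habs', habs]⟩
          · rw [if_neg (fun hl => hlt (hcond.mp hl))]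
            have hid : csPush s ((vals.headD []).getD 0 0) = s := by
              unfold csPush; rw [if_neg hlt]
            rw [hid]
            apply ih
            · exact hrest
            intro s' hs'
            injection hs' with hs'
            subst hs'
            exact ⟨hInv, habs⟩
      · by_cases hq : op = "pop"
        · subst hq
          cases st with
          | none =>
            replace hpre : (false && preOK false ops vals.tail) = true := hpre
            simp at hpre
          | some s =>
            replace hpre : (true && preOK true ops vals.tail) = true := hpre
            rw [Bool.true_and] at hpre
            obtain ⟨hInv, habs⟩ := hinv s rfl
            rw [dg_pop, da_pop]
            by_cases h0 : s.size = 0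
            · have hemp : stack.isEmpty = true := by rw [habs]; simp [absStack, h0]
              rw [if_pos hemp]
              have hcs : csPop s = (s, -1) := by unfold csPop; rw [if_pos h0]
              rw [hcs]
              apply ih
              · exact hpre
              intro s' hs'
              injection hs' with hs'
              subst hs'
              exact ⟨hInv, habs⟩
            · obtain ⟨hval, habs', hInv'⟩ := abs_pop hInv h0
              have hne : stack.isEmpty = false := by
                rw [habs, List.isEmpty_eq_false_iff, ← List.length_pos_iff, length_absStack]
                omega
              rw [if_neg (by simp [hne]), hval, habs, ← habs']
              apply ih
              · exact hpre
              intro s' hs'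
              injection hs' with hs'
              subst hs'
              exact ⟨hInv', rfl⟩
        · by_cases hr : op = "increment"
          · subst hr
            cases st with
            | none =>
              replace hpre : ((false && (!vals.isEmpty && decide (2 ≤ (vals.headD []).length)
                  && decide ((1:Int) ≤ (vals.headD []).getD 0 0)))
                  && preOK false ops vals.tail) = true := hpre
              simp at hpre
            | some s =>
              replace hpre : ((true && (!vals.isEmpty && decide (2 ≤ (vals.headD []).length)
                  && decide ((1:Int) ≤ (vals.headD []).getD 0 0)))
                  && preOK true ops vals.tail) = true := hpre
              rw [Bool.and_eq_true, Bool.true_and, Bool.and_eq_true] at hpre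
              have hrest := hpre.2
              have hk : (1:Int) ≤ (vals.headD []).getD 0 0 := of_decide_eq_true hpre.1.2
              obtain ⟨hInv, habs⟩ := hinv s rfl
              rw [dg_inc, da_inc]
              obtain ⟨habs', hInv'⟩ := abs_inc hInv ((vals.headD []).getD 1 0) hk
              rw [habs, habs']
              apply ih
              · exact hrest
              intro s' hs'
              injection hs' with hs'
              subst hs'
              exact ⟨hInv', rfl⟩
          · have hpre' : preOK st.isSome ops vals.tail = true := by
              revert hpre
              show (if op = "CustomStack" then _ else if op = "push" then _
                    else if op = "pop" then _ else if op = "increment" then _ else _) = true → _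
              rw [if_neg hc, if_neg hp, if_neg hq, if_neg hr]
              exact id
            rw [dg_other op ops vals st acc hc hp hq hr,
              da_other op ops vals stack mx acc hc hp hq hr]
            exact ih _ _ _ _ _ hpre' hinv

-- ===== VERDICT (by name: the statement is the Claim_ definition above) =====
theorem driver_spec : Claim_equal_driver := by
  intro operations values _ hpre
  unfold Spec_driver driver driver_alt
  apply go_eq
  · exact hpre
  · intro s hs; cases hs
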